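-- pv_equiv track=rewrite | github.com/umaimagit/CodilitySolutions | 6. Sorting/NumberOfDiscInrtersection.py | solution
-- ===== SOURCE A (Python) =====
-- def solution(A):
--
-- # Below code 50 %
--     N = len(A)
--
--     upperLimit = []
--     lowerLimit = []
--
--     count = 0
--
--     for i in range(0, N):
--
--         upperLimit.append(i + A[i])
--         lowerLimit.append(i - A[i])
--
--
--     for i in range(0, N-1):
--
--         for j in range(i+1, N):
--
--             if upperLimit[i] >= lowerLimit[j] and upperLimit[j] >= lowerLimit[i]:
--
--                 count += 1
--
--                 if count > 10000000:
--                     return -1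
--
--     return count
-- ===== SOURCE B (Python) =====
-- def solution(A):
--     # For i < j the discs intersect iff (j - A[j]) <= (i + A[i]); sweep j left to
--     # right keeping the previous upper limits in a sorted list and count by
--     # binary search instead of scanning all earlier discs.
--     sorted_us = []
--     count = 0
--     for j, a in enumerate(A):
--         lj = j - a
--         lo, hi = 0, len(sorted_us)
--         while lo < hi:
--             mid = (lo + hi) // 2
--             if sorted_us[mid] < lj:
--                 lo = mid + 1
--             else:
--                 hi = mid
--         count += len(sorted_us) - lo
--         uj = j + a
--         lo2, hi2 = 0, len(sorted_us)
--         while lo2 < hi2: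
--             mid = (lo2 + hi2) // 2
--             if sorted_us[mid] < uj:
--                 lo2 = mid + 1
--             else:
--                 hi2 = mid
--         sorted_us.insert(lo2, uj)
--     return -1 if count > 10000000 else count
-- ===== Notes on version B (the rewrite author's own statement) =====
-- stated objective: faster
-- what changed: A compares every pair of discs with a nested double loop; B sweeps the discs left to right, keeping the earlier upper limits in a sorted list and counting, via hand-written binary search, how many of them reach the current disc's lower limit (for i<j the two-sided overlap test reduces to the single inequality j-A[j] <= i+A[i]); the same >10000000 -> -1 cap is applied to the final total.
import Mathlib
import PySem

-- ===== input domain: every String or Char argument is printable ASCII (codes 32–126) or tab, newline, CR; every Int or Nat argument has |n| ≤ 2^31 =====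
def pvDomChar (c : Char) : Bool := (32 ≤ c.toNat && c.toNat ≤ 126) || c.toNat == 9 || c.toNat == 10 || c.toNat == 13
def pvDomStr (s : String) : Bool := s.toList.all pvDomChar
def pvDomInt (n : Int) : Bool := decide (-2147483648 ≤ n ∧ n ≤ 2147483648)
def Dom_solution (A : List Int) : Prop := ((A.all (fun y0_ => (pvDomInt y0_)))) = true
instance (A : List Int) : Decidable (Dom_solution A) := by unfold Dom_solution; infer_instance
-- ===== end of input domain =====

set_option maxRecDepth 4000


-- B replaces A's quadratic all-pairs scan by a left-to-right sweep that keeps the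
-- earlier upper limits in a sorted list and counts partners by binary search
-- (objective: faster).

-- ===== PORT A =====
-- inner 'for j in range(i+1, N)' loop; '.error r' models A's early 'return -1'
def solInnerA (upper lower : List Int) (i : Int) (js : List Int) (count : Int) :
    Except Int Int :=
  match js with
  | [] => .ok count
  | j :: rest =>
    if PySem.List.pyGetD upper i 0 ≥ PySem.List.pyGetD lower j 0 ∧
       PySem.List.pyGetD upper j 0 ≥ PySem.List.pyGetD lower i 0 then
      if count + 1 > 10000000 then .error (-1)
      else solInnerA upper lower i rest (count + 1)
    else solInnerA upper lower i rest count

def solOuterA (upper lower : List Int) (N : Int) (is_ : List Int) (count : Int) :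
    Except Int Int :=
  match is_ with
  | [] => .ok count
  | i :: rest =>
    match solInnerA upper lower i (PySem.List.pyRange (i+1) N) count with
    | .error r => .error r
    | .ok c => solOuterA upper lower N rest c

def solution (A : List Int) : Int :=
  let N : Int := A.length
  let ul := (PySem.List.pyRange 0 N).foldl
      (fun (p : List Int × List Int) i =>
        (p.1 ++ [i + PySem.List.pyGetD A i 0], p.2 ++ [i - PySem.List.pyGetD A i 0]))
      ([], [])
  match solOuterA ul.1 ul.2 N (PySem.List.pyRange 0 (N - 1)) 0 with
  | .error r => r
  | .ok c => c


-- ===== PORT B =====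
-- Source B's hand-written 'while lo < hi' bisect_left loop, transliterated
def bisectB (s : List Int) (x : Int) (lo hi : Int) : Int :=
  if h : lo < hi then
    let mid := PySem.Int.floordiv (lo + hi) 2
    if PySem.List.pyGetD s mid 0 < x then bisectB s x (mid + 1) hi
    else bisectB s x lo mid
  else lo
termination_by (hi - lo).toNat
decreasing_by
  · have h1 : lo ≤ PySem.Int.floordiv (lo + hi) 2 :=
      (PySem.Int.le_floordiv_iff_mul_le (by omega)).2 (by omega)
    omega
  · have h2 : PySem.Int.floordiv (lo + hi) 2 < hi :=
      (PySem.Int.floordiv_lt_iff_lt_mul (by omega)).2 (by omega)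
    omega

-- the body of Source B's 'for j, a in enumerate(A)' loop
def stepB (st : List Int × Int) (ja : Int × Int) : List Int × Int :=
  let s := st.1
  let lj := ja.1 - ja.2
  let lo := bisectB s lj 0 (s.length : Int)
  let c := st.2 + ((s.length : Int) - lo)
  let uj := ja.1 + ja.2
  let lo2 := bisectB s uj 0 (s.length : Int)
  (PySem.List.insert s lo2 uj, c)

def solution_alt (A : List Int) : Int :=
  let st := (PySem.List.enumerate A).foldl stepB ([], 0)
  if st.2 > 10000000 then -1 else st.2


-- ===== PRECONDITION & SPEC =====
def Spec_solution (A : List Int) (out : Int) : Prop := out = solution_alt A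
instance (A : List Int) (out : Int) : Decidable (Spec_solution A out) := by unfold Spec_solution; infer_instance

-- ===== CLAIM (what is proved, stated in full; the proofs are below) =====
def Claim_equal_solution : Prop := ∀ (A : List Int), Dom_solution A → Spec_solution A (solution A)

-- ===== LEMMAS AND PROOFS =====

def cntLt (s : List Int) (x : Int) : Nat := s.countP (fun a => decide (a < x))

lemma cntLt_eq_takeWhile (s : List Int) (hs : s.Pairwise (· ≤ ·)) (x : Int) :
    cntLt s x = (s.takeWhile (fun a => decide (a < x))).length := by
  induction s with
  | nil => simp [cntLt]
  | cons a t ih =>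
    rcases List.pairwise_cons.1 hs with ⟨ha, ht⟩
    by_cases h : a < x
    · simp [cntLt, h] at *
      exact ih ht
    · simp [cntLt, h]
      intro b hb
      exact le_trans (not_lt.1 h) (ha b hb)

lemma dropWhile_ge (s : List Int) (hs : s.Pairwise (· ≤ ·)) (x : Int) :
    ∀ y ∈ s.dropWhile (fun a => decide (a < x)), x ≤ y := by
  induction s with
  | nil => simp
  | cons a t ih =>
    rcases List.pairwise_cons.1 hs with ⟨ha, ht⟩
    by_cases h : a < x
    · simpa [List.dropWhile_cons, h] using ih ht
    · simp only [List.dropWhile_cons, decide_eq_true_eq, h, if_false]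
      intro y hy
      rcases List.mem_cons.1 hy with rfl | hy
      · omega
      · exact le_trans (by omega) (ha y hy)

lemma sorted_getElem_lt_iff (s : List Int) (hs : s.Pairwise (· ≤ ·)) (x : Int)
    (k : Nat) (hk : k < s.length) : s[k] < x ↔ k < cntLt s x := by
  rw [cntLt_eq_takeWhile s hs x]
  have hlen : (s.takeWhile (fun a => decide (a < x))).length
      + (s.dropWhile (fun a => decide (a < x))).length = s.length := by
    rw [← List.length_append, List.takeWhile_append_dropWhile]
  constructor
  · intro hlt
    by_contra hge
    push_neg at hge
    -- dropWhile part is exactly the drop at the takeWhile length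
    have hdw : s.dropWhile (fun a => decide (a < x))
        = s.drop (s.takeWhile (fun a => decide (a < x))).length := by
      have hsuf := List.dropWhile_suffix (l := s) (fun a => decide (a < x))
      rw [List.suffix_iff_eq_drop] at hsuf
      rw [hsuf]
      congr 1
      omega
    have hk' : k - (s.takeWhile (fun a => decide (a < x))).length
        < (s.drop (s.takeWhile (fun a => decide (a < x))).length).length := by
      simp
      omega
    have hget : (s.drop (s.takeWhile (fun a => decide (a < x))).length)[k - (s.takeWhile (fun a => decide (a < x))).length]'hk' = s[k] := by
      rw [List.getElem_drop]
      congr 1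
      omega
    have hmem : s[k] ∈ s.dropWhile (fun a => decide (a < x)) := by
      rw [hdw, ← hget]
      exact List.getElem_mem _
    have := dropWhile_ge s hs x _ hmem
    omega
  · intro hlt
    have hpre := List.takeWhile_prefix (l := s) (fun a => decide (a < x))
    have heq := hpre.getElem (i := k) hlt
    have hmem : (s.takeWhile (fun a => decide (a < x)))[k] ∈ s.takeWhile (fun a => decide (a < x)) := List.getElem_mem _
    have hpx := List.mem_takeWhile_imp hmem
    rw [heq] at hpx
    simpa using hpx

lemma bisectB_eq_aux (s : List Int) (hs : s.Pairwise (· ≤ ·)) (x : Int) :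
    ∀ (k : Nat) (lo hi : Int), (hi - lo).toNat ≤ k → 0 ≤ lo → lo ≤ (cntLt s x : Int) →
    (cntLt s x : Int) ≤ hi → hi ≤ (s.length : Int) → bisectB s x lo hi = (cntLt s x : Int) := by
  intro k
  induction k with
  | zero =>
    intro lo hi hk h0 hlo hhi hlen
    rw [bisectB, dif_neg (by omega)]
    omega
  | succ k ih =>
    intro lo hi hk h0 hlo hhi hlen
    rw [bisectB]
    by_cases h : lo < hi
    · simp only [dif_pos h]
      have hmb := PySem.Int.floordiv_two_mid_bounds (le_of_lt h)
      have hmlt : PySem.Int.floordiv (lo + hi) 2 < hi :=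
        (PySem.Int.floordiv_lt_iff_lt_mul (by omega)).2 (by omega)
      set mid := PySem.Int.floordiv (lo + hi) 2 with hmid
      have hget : PySem.List.pyGetD s mid 0 = s[mid.toNat] :=
        PySem.List.pyGetD_eq_getElem s 0 (by omega) (by omega)
      by_cases hlt : PySem.List.pyGetD s mid 0 < x
      · rw [if_pos hlt]
        rw [hget] at hlt
        have hcnt : mid.toNat < cntLt s x :=
          (sorted_getElem_lt_iff s hs x mid.toNat (by omega)).1 hlt
        exact ih (mid + 1) hi (by omega) (by omega) (by omega) hhi hlen
      · rw [if_neg hlt]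
        rw [hget] at hlt
        have hcnt : ¬ mid.toNat < cntLt s x := fun hc =>
          hlt ((sorted_getElem_lt_iff s hs x mid.toNat (by omega)).2 hc)
        exact ih lo mid (by omega) h0 hlo (by omega) (by omega)
    · rw [dif_neg h]
      omega

lemma bisectB_eq (s : List Int) (hs : s.Pairwise (· ≤ ·)) (x : Int) :
    bisectB s x 0 (s.length : Int) = (cntLt s x : Int) := by
  have hc : cntLt s x ≤ s.length := List.countP_le_length
  exact bisectB_eq_aux s hs x s.length 0 (s.length : Int) (by omega) (by omega)
    (by omega) (by omega) (by omega)

lemma countP_not_add {α : Type} (l : List α) (p : α → Bool) :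
    l.countP p + l.countP (fun a => !p a) = l.length := by
  induction l with
  | nil => simp
  | cons a t ih => by_cases h : p a <;> simp [List.countP_cons, h] <;> omega

lemma insert_cnt_perm (s : List Int) (x : Int) :
    (PySem.List.insert s ((cntLt s x : Nat) : Int) x).Perm (x :: s) := by
  rw [PySem.List.insert_natCast s (cntLt s x) x List.countP_le_length]
  have h := List.perm_middle (a := x) (l₁ := s.take (cntLt s x)) (l₂ := s.drop (cntLt s x))
  simpa [List.take_append_drop] using h

lemma take_cnt_eq (s : List Int) (hs : s.Pairwise (· ≤ ·)) (x : Int) :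
    s.take (cntLt s x) = s.takeWhile (fun a => decide (a < x)) := by
  have hpre := List.takeWhile_prefix (l := s) (fun a => decide (a < x))
  rw [List.prefix_iff_eq_take] at hpre
  rw [cntLt_eq_takeWhile s hs x]
  exact hpre.symm

lemma drop_cnt_eq (s : List Int) (hs : s.Pairwise (· ≤ ·)) (x : Int) :
    s.drop (cntLt s x) = s.dropWhile (fun a => decide (a < x)) := by
  have hlen : (s.takeWhile (fun a => decide (a < x))).length
      + (s.dropWhile (fun a => decide (a < x))).length = s.length := by
    rw [← List.length_append, List.takeWhile_append_dropWhile]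
  have hsuf := List.dropWhile_suffix (l := s) (fun a => decide (a < x))
  rw [List.suffix_iff_eq_drop] at hsuf
  rw [cntLt_eq_takeWhile s hs x, hsuf]
  congr 1
  omega

lemma insert_cnt_sorted (s : List Int) (hs : s.Pairwise (· ≤ ·)) (x : Int) :
    (PySem.List.insert s ((cntLt s x : Nat) : Int) x).Pairwise (· ≤ ·) := by
  rw [PySem.List.insert_natCast s (cntLt s x) x List.countP_le_length]
  rw [take_cnt_eq s hs x, drop_cnt_eq s hs x]
  rw [List.pairwise_append]
  refine ⟨List.Pairwise.sublist (List.takeWhile_sublist _) hs, ?_, ?_⟩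
  · rw [List.pairwise_cons]
    exact ⟨dropWhile_ge s hs x, List.Pairwise.sublist (List.dropWhile_sublist _) hs⟩
  · intro a ha b hb
    have hax : a < x := by simpa using List.mem_takeWhile_imp ha
    rcases List.mem_cons.1 hb with rfl | hb
    · omega
    · have := dropWhile_ge s hs x b hb
      omega

def uL (A : List Int) (k : Nat) : Int := (k : Int) + A.getD k 0
def lL (A : List Int) (k : Nat) : Int := (k : Int) - A.getD k 0

lemma foldB_spec (A : List Int) :
    ∀ (rest : List Int) (j0 : Nat) (s : List Int) (c : Int),
    A.drop j0 = rest → s.Perm ((List.range j0).map (uL A)) → s.Pairwise (· ≤ ·) →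
    ((PySem.List.enumerate rest (j0 : Int)).foldl stepB (s, c)).2
      = c + ∑ j ∈ Finset.Ico j0 A.length,
          ((List.range j).countP (fun i => decide (lL A j ≤ uL A i)) : Int) := by
  intro rest
  induction rest with
  | nil =>
    intro j0 s c hdrop hperm hsort
    have : A.length ≤ j0 := List.drop_eq_nil_iff.1 hdrop
    rw [Finset.Ico_eq_empty (by omega)]
    simp [PySem.List.enumerate]
  | cons a rest' ih =>
    intro j0 s c hdrop hperm hsort
    have hj0 : j0 < A.length := by
      by_contra hge
      rw [List.drop_eq_nil_iff.2 (by omega)] at hdrop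
      simp at hdrop
    have ha : A.getD j0 0 = a := by
      have h0 := List.getElem_drop (xs := A) (i := j0) (j := 0)
        (h := by rw [hdrop]; simp)
      simp [hdrop] at h0
      rw [List.getD_eq_getElem A 0 hj0]
      simpa using h0.symm
    have hdrop' : A.drop (j0 + 1) = rest' := by
      have := congrArg (List.drop 1) hdrop
      simpa [List.drop_drop] using this
    have hlenS : s.length = j0 := by
      have := hperm.length_eq
      simpa using this
    rw [PySem.List.enumerate_cons, List.foldl_cons]
    have hcast : ((j0 : Int) + 1) = ((j0 + 1 : Nat) : Int) := by omega
    rw [hcast]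
    -- evaluate one step
    have hcntl : cntLt s ((j0 : Int) - a)
        = (List.range j0).countP (fun i => decide (uL A i < lL A j0)) := by
      unfold cntLt
      rw [hperm.countP_eq, List.countP_map]
      apply List.countP_congr
      intro i _
      simp [Function.comp, lL, ← List.getD_eq_getElem?_getD, ha]
    have hstep : stepB (s, c) ((j0 : Int), a)
        = (PySem.List.insert s ((cntLt s ((j0:Int) + a) : Nat) : Int) ((j0:Int) + a),
           c + ((s.length : Int) - (cntLt s ((j0:Int) - a) : Nat))) := by
      simp only [stepB, bisectB_eq s hsort]
    rw [hstep]
    have hperm' : (PySem.List.insert s ((cntLt s ((j0:Int) + a) : Nat) : Int) ((j0:Int) + a)).Perm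
        ((List.range (j0 + 1)).map (uL A)) := by
      refine (insert_cnt_perm s _).trans ?_
      have huj : (j0 : Int) + a = uL A j0 := by simp [uL, ← List.getD_eq_getElem?_getD, ha]
      rw [huj, List.range_succ, List.map_append]
      exact ((List.perm_append_singleton _ _).trans (hperm.symm.cons _)).symm
    have hsort' := insert_cnt_sorted s hsort ((j0:Int) + a)
    rw [ih (j0 + 1) _ _ hdrop' hperm' hsort']
    rw [Finset.sum_eq_sum_Ico_succ_bot hj0]
    have hsub : ((s.length : Int) - (cntLt s ((j0:Int) - a) : Nat))
        = ((List.range j0).countP (fun i => decide (lL A j0 ≤ uL A i)) : Int) := by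
      rw [hcntl]
      have hadd := countP_not_add (List.range j0) (fun i => decide ((uL A i : Int) < lL A j0))
      have hcong : (List.range j0).countP (fun i => !decide (uL A i < lL A j0))
          = (List.range j0).countP (fun i => decide (lL A j0 ≤ uL A i)) := by
        apply List.countP_congr
        intro i _
        simp [not_lt]
      rw [hcong] at hadd
      have hle : (List.range j0).countP (fun i => decide (uL A i < lL A j0)) ≤ j0 := by
        have := List.countP_le_length (p := fun i => decide (uL A i < lL A j0)) (l := List.range j0)
        simpa using this
      simp at hadd ⊢
      omega
    rw [hsub]
    push_cast
    ring
def TB (A : List Int) : Nat :=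
  ∑ j ∈ Finset.range A.length,
    (List.range j).countP (fun i => decide (lL A j ≤ uL A i))

lemma solution_alt_eq (A : List Int) :
    solution_alt A = if (TB A : Int) > 10000000 then -1 else (TB A : Int) := by
  have h := foldB_spec A A 0 [] 0 (by simp) (by simp) (by simp)
  rw [show ((0:Nat):Int) = 0 from rfl] at h
  show (if (List.foldl stepB ([], 0) (PySem.List.enumerate A)).2 > 10000000 then -1
        else (List.foldl stepB ([], 0) (PySem.List.enumerate A)).2)
      = if (TB A : Int) > 10000000 then -1 else (TB A : Int)
  rw [h]
  have : (0:Int) + ∑ j ∈ Finset.Ico 0 A.length,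
      ((List.range j).countP (fun i => decide (lL A j ≤ uL A i)) : Int) = (TB A : Int) := by
    rw [← Finset.range_eq_Ico]
    unfold TB
    push_cast
    ring
  rw [this]

-- the condition tested by A's inner loop
def condA (upper lower : List Int) (i j : Int) : Bool :=
  decide (PySem.List.pyGetD upper i 0 ≥ PySem.List.pyGetD lower j 0 ∧
          PySem.List.pyGetD upper j 0 ≥ PySem.List.pyGetD lower i 0)

lemma foldl_pair_append {α : Type} (xs : List α) (f g : α → Int) (a1 a2 : List Int) :
    xs.foldl (fun p i => (p.1 ++ [f i], p.2 ++ [g i])) (a1, a2)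
      = (a1 ++ xs.map f, a2 ++ xs.map g) := by
  induction xs generalizing a1 a2 with
  | nil => simp
  | cons x xs ih => simp [ih]

lemma build_eq (A : List Int) :
    (PySem.List.pyRange 0 (A.length : Int)).foldl
      (fun (p : List Int × List Int) i =>
        (p.1 ++ [i + PySem.List.pyGetD A i 0], p.2 ++ [i - PySem.List.pyGetD A i 0]))
      ([], [])
    = ((List.range A.length).map (uL A), (List.range A.length).map (lL A)) := by
  rw [PySem.List.pyRange_zero_natCast, List.foldl_map]
  rw [foldl_pair_append (List.range A.length)
    (fun k : Nat => (k : Int) + PySem.List.pyGetD A (k : Int) 0)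
    (fun k : Nat => (k : Int) - PySem.List.pyGetD A (k : Int) 0) [] []]
  simp only [List.nil_append]
  congr 1 <;> {
    apply List.map_congr_left
    intro k _
    simp [uL, lL, PySem.List.pyGetD_natCast]
  }

lemma inner_spec (upper lower : List Int) (i : Int) :
    ∀ (js : List Int) (c : Int), 0 ≤ c → c ≤ 10000000 →
    solInnerA upper lower i js c =
      (if c + (js.countP (condA upper lower i) : Int) > 10000000 then .error (-1)
       else .ok (c + (js.countP (condA upper lower i) : Int))) := by
  intro js
  induction js with
  | nil =>
    intro c h0 hc
    simp [solInnerA, List.countP_nil]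
    omega
  | cons j rest ih =>
    intro c h0 hc
    rw [solInnerA]
    by_cases h : PySem.List.pyGetD upper i 0 ≥ PySem.List.pyGetD lower j 0 ∧
       PySem.List.pyGetD upper j 0 ≥ PySem.List.pyGetD lower i 0
    · rw [if_pos h]
      have hcnt : (j :: rest).countP (condA upper lower i)
          = rest.countP (condA upper lower i) + 1 := by
        rw [List.countP_cons]
        simp [condA, h]
      rw [hcnt]
      have hr : (0:Int) ≤ (rest.countP (condA upper lower i) : Int) := by positivity
      by_cases h1 : c + 1 > 10000000
      · rw [if_pos h1, if_pos (by push_cast; omega)]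
      · rw [if_neg h1, ih (c+1) (by omega) (by omega)]
        rw [if_congr (by constructor <;> (intro hx; push_cast at *; omega)) rfl rfl]
        have harith2 : c + 1 + (rest.countP (condA upper lower i) : Int)
            = c + ((rest.countP (condA upper lower i) + 1 : Nat) : Int) := by push_cast; ring
        rw [harith2]
    · rw [if_neg h]
      have hcnt : (j :: rest).countP (condA upper lower i)
          = rest.countP (condA upper lower i) := by
        rw [List.countP_cons]
        simp [condA, h]
      rw [hcnt]
      exact ih c h0 hc

-- count contributed by one outer iteration of A
def mA (upper lower : List Int) (N i : Int) : Int :=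
  ((PySem.List.pyRange (i+1) N).countP (condA upper lower i) : Int)

lemma mA_nonneg (upper lower : List Int) (N i : Int) : 0 ≤ mA upper lower N i := by
  unfold mA; positivity

lemma outer_spec (upper lower : List Int) (N : Int) :
    ∀ (is_ : List Int) (c : Int), 0 ≤ c → c ≤ 10000000 →
    solOuterA upper lower N is_ c =
      (if c + (is_.map (mA upper lower N)).sum > 10000000 then .error (-1)
       else .ok (c + (is_.map (mA upper lower N)).sum)) := by
  intro is_
  induction is_ with
  | nil =>
    intro c h0 hc
    simp [solOuterA]
    omega
  | cons i rest ih =>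
    intro c h0 hc
    rw [solOuterA]
    have hsum : ((i :: rest).map (mA upper lower N)).sum
        = mA upper lower N i + (rest.map (mA upper lower N)).sum := by
      simp
    have hrest0 : 0 ≤ (rest.map (mA upper lower N)).sum := by
      apply List.sum_nonneg
      intro x hx
      rcases List.mem_map.1 hx with ⟨y, _, rfl⟩
      exact mA_nonneg upper lower N y
    have hm0 : 0 ≤ mA upper lower N i := mA_nonneg upper lower N i
    rw [inner_spec upper lower i _ c h0 hc]
    have hfold : ((PySem.List.pyRange (i+1) N).countP (condA upper lower i) : Int)
        = mA upper lower N i := rfl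
    rw [hfold]
    by_cases h1 : c + mA upper lower N i > 10000000
    · rw [if_pos h1]
      rw [hsum, if_pos (by omega)]
    · rw [if_neg h1]
      show solOuterA upper lower N rest (c + mA upper lower N i) = _
      rw [ih (c + mA upper lower N i) (by omega) (by omega)]
      rw [hsum]
      have hassoc : c + mA upper lower N i + (List.map (mA upper lower N) rest).sum
          = c + (mA upper lower N i + (List.map (mA upper lower N) rest).sum) := by ring
      rw [hassoc]

def TAint (A : List Int) : Int :=
  ((PySem.List.pyRange 0 ((A.length : Int) - 1)).map
    (mA ((List.range A.length).map (uL A)) ((List.range A.length).map (lL A))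
      (A.length : Int))).sum

lemma solution_eq (A : List Int) :
    solution A = if TAint A > 10000000 then -1 else TAint A := by
  show (match solOuterA
      ((PySem.List.pyRange 0 (A.length : Int)).foldl
        (fun (p : List Int × List Int) i =>
          (p.1 ++ [i + PySem.List.pyGetD A i 0], p.2 ++ [i - PySem.List.pyGetD A i 0]))
        ([], [])).1
      ((PySem.List.pyRange 0 (A.length : Int)).foldl
        (fun (p : List Int × List Int) i =>
          (p.1 ++ [i + PySem.List.pyGetD A i 0], p.2 ++ [i - PySem.List.pyGetD A i 0]))
        ([], [])).2
      (A.length : Int) (PySem.List.pyRange 0 ((A.length : Int) - 1)) 0 with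
    | .error r => r | .ok c => c) = if TAint A > 10000000 then -1 else TAint A
  rw [build_eq A]
  rw [outer_spec _ _ _ _ 0 (by omega) (by omega)]
  have hz : (0:Int) + ((PySem.List.pyRange 0 ((A.length : Int) - 1)).map
      (mA ((List.range A.length).map (uL A)) ((List.range A.length).map (lL A))
        (A.length : Int))).sum = TAint A := by
    unfold TAint; ring
  rw [hz]
  by_cases h : TAint A > 10000000
  · rw [if_pos h, if_pos h]
  · rw [if_neg h, if_neg h]

lemma list_sum_map_range {M : Type} [AddCommMonoid M] (m : Nat) (f : Nat → M) :
    ((List.range m).map f).sum = ∑ i ∈ Finset.range m, f i := by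
  induction m with
  | zero => simp
  | succ m ih => simp [List.range_succ, Finset.sum_range_succ, ih]

lemma countP_range_succ (p : Nat → Bool) (m : Nat) :
    (List.range (m+1)).countP p = (List.range m).countP p + (if p m then 1 else 0) := by
  simp [List.range_succ, List.countP_append, List.countP_cons]

lemma countP_range_sum (p : Nat → Bool) (m : Nat) :
    (List.range m).countP p = ∑ i ∈ Finset.range m, (if p i then 1 else 0) := by
  induction m with
  | zero => simp
  | succ m ih => rw [countP_range_succ, ih, Finset.sum_range_succ]

lemma tri_swap (q : Nat → Nat → Bool) :
    ∀ n, (∑ k ∈ Finset.range n, (List.range (n-k-1)).countP (fun t => q k (k+1+t)))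
      = ∑ j ∈ Finset.range n, (List.range j).countP (fun i => q i j) := by
  intro n
  induction n with
  | zero => simp
  | succ n ih =>
    rw [Finset.sum_range_succ, Finset.sum_range_succ]
    have hlast : (List.range (n+1-n-1)).countP (fun t => q n (n+1+t)) = 0 := by
      simp
    rw [hlast]
    have hstep : ∀ k ∈ Finset.range n,
        (List.range (n+1-k-1)).countP (fun t => q k (k+1+t))
          = (List.range (n-k-1)).countP (fun t => q k (k+1+t)) + (if q k n then 1 else 0) := by
      intro k hk
      have hk' : k < n := Finset.mem_range.1 hk
      have h1 : n+1-k-1 = (n-k-1)+1 := by omega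
      rw [h1, countP_range_succ]
      have h2 : k+1+(n-k-1) = n := by omega
      rw [h2]
    rw [Finset.sum_congr rfl hstep, Finset.sum_add_distrib, ih, ← countP_range_sum]
    omega

lemma TA_eq_TB (A : List Int) : TAint A = (TB A : Int) := by
  unfold TAint
  have htn : (((A.length : Int) - 1 - 0)).toNat = A.length - 1 := by omega
  rw [PySem.List.pyRange_one 0 ((A.length : Int) - 1), htn, List.map_map]
  rw [list_sum_map_range]
  have hcong : ∀ k ∈ Finset.range (A.length - 1),
      (mA ((List.range A.length).map (uL A)) ((List.range A.length).map (lL A))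
        (A.length : Int) ∘ (fun t : Nat => (0:Int) + ↑t)) k
      = (((List.range (A.length - k - 1)).countP
          (fun t => decide (lL A (k+1+t) ≤ uL A k)) : Nat) : Int) := by
    intro k hk
    have hk' : k < A.length - 1 := Finset.mem_range.1 hk
    simp only [Function.comp, zero_add]
    unfold mA
    have htn2 : (((A.length : Int) - ((k:Int) + 1))).toNat = A.length - k - 1 := by omega
    rw [PySem.List.pyRange_one ((k:Int) + 1) (A.length : Int), htn2, List.countP_map]
    congr 1
    apply List.countP_congr
    intro t ht
    have ht' : t < A.length - k - 1 := by simpa using ht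
    have hj : (k:Int) + 1 + (t:Int) = ((k+1+t : Nat) : Int) := by push_cast; ring
    have hkn : k < A.length := by omega
    have hjn : k+1+t < A.length := by omega
    simp only [Function.comp, condA, hj]
    rw [PySem.List.pyGetD_natCast, PySem.List.pyGetD_natCast,
        PySem.List.pyGetD_natCast, PySem.List.pyGetD_natCast]
    rw [PySem.List.getD_map_range (uL A) _ _ _ hkn, PySem.List.getD_map_range (lL A) _ _ _ hkn,
        PySem.List.getD_map_range (uL A) _ _ _ hjn, PySem.List.getD_map_range (lL A) _ _ _ hjn]
    simp only [decide_eq_true_eq, ge_iff_le]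
    unfold uL lL
    push_cast
    omega
  rw [Finset.sum_congr rfl hcong]
  rw [← Nat.cast_sum]
  have hext : (∑ k ∈ Finset.range (A.length - 1),
      (List.range (A.length - k - 1)).countP (fun t => decide (lL A (k+1+t) ≤ uL A k)))
      = (∑ k ∈ Finset.range A.length,
      (List.range (A.length - k - 1)).countP (fun t => decide (lL A (k+1+t) ≤ uL A k))) := by
    cases hA : A.length with
    | zero => simp
    | succ m =>
      rw [Finset.sum_range_succ]
      have : (List.range (m+1-m-1)).countP (fun t => decide (lL A (m+1+t) ≤ uL A m)) = 0 := by
        simp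
      rw [this]
      simp
  rw [hext]
  rw [tri_swap (fun i j => decide (lL A j ≤ uL A i)) A.length]
  rfl

-- ===== VERDICT (by name: the statement is the Claim_ definition above) =====
theorem solution_spec : Claim_equal_solution := by
  intro A _
  unfold Spec_solution
  rw [solution_eq, solution_alt_eq, TA_eq_TB]
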